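-- pv_equiv track=rewrite | github.com/Kyrie11/acs_planner | planner/preprocess/metadata_extractor.py | _pick_primary_time_table
-- ===== SOURCE A (Python) =====
-- from typing import Any, Dict, Iterable, Iterator, List, Mapping, Sequence
--
-- def _pick_primary_time_table(candidates: Sequence[tuple[str, str]]) -> tuple[str, str]:
--     preferred = ["lidar_pc", "ego_pose", "scene", "scenario"]
--     for pref in preferred:
--         for table, ts_col in candidates:
--             if table == pref:
--                 return table, ts_col
--     if not candidates:
--         raise ValueError("No time-indexed table found in database")
--     return candidates[0]
-- ===== SOURCE B (Python) =====
-- def _pick_primary_time_table(candidates):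
--     if not candidates:
--         raise ValueError("No time-indexed table found in database")
--     rank = {"lidar_pc": 0, "ego_pose": 1, "scene": 2, "scenario": 3}
--     best = candidates[0]
--     best_rank = rank.get(best[0], 4)
--     for cand in candidates[1:]:
--         r = rank.get(cand[0], 4)
--         if r < best_rank:
--             best, best_rank = cand, r
--     return best
-- ===== Notes on version B (the rewrite author's own statement) =====
-- stated objective: alternative
-- what changed: Replaces A's nested scan (for each preferred name, rescan all candidates) by a priority-rank dict and a single strictly-best-so-far pass over the candidates, so each candidate is examined once.
import Mathlib
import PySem

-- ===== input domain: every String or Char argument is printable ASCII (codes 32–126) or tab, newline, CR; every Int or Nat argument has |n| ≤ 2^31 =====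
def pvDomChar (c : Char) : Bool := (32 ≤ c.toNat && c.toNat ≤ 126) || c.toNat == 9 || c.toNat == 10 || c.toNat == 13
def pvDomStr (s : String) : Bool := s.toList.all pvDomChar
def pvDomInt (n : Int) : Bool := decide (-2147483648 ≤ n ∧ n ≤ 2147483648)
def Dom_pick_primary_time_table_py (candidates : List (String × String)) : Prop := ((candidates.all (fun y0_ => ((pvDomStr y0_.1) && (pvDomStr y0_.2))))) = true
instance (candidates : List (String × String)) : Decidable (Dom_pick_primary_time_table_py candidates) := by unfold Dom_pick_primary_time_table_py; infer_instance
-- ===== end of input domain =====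

-- B replaces A's nested scan (per preferred name, rescan candidates) with a rank dict and one
-- strictly-best-so-far pass over the candidates; return value only, no mutation in either version.

-- ===== PORT A =====
-- inner 'for table, ts_col in candidates: if table == pref: return table, ts_col'
def pickA_inner (pref : String) : List (String × String) → Option (String × String)
  | [] => none
  | c :: rest => if c.1 == pref then some c else pickA_inner pref rest

-- outer 'for pref in preferred: …' (an early return propagates as 'some')
def pickA_outer (cs : List (String × String)) : List String → Option (String × String)
  | [] => none
  | p :: ps =>
    match pickA_inner p cs with
    | some c => some c
    | none => pickA_outer cs ps

def pick_primary_time_table_py (candidates : List (String × String)) : String × String :=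
  match pickA_outer candidates ["lidar_pc", "ego_pose", "scene", "scenario"] with
  | some c => c
  | none =>
    match candidates with
    | c :: _ => c
    | [] => ("", "")   -- Python raises ValueError here; excluded by Pre_

-- ===== PORT B =====
def pvRankDict : PySem.Dict String Int :=
  PySem.Dict.ofList [("lidar_pc", 0), ("ego_pose", 1), ("scene", 2), ("scenario", 3)]

def pvRank (t : String) : Int := pvRankDict.getD t 4

def pickB_loop (best : String × String) (bestRank : Int) : List (String × String) → String × String
  | [] => best
  | c :: rest =>
    let r := pvRank c.1
    if r < bestRank then pickB_loop c r rest else pickB_loop best bestRank rest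

def pick_primary_time_table_py_alt (candidates : List (String × String)) : String × String :=
  match candidates with
  | [] => ("", "")   -- Python raises ValueError here; excluded by Pre_
  | c :: rest => pickB_loop c (pvRank c.1) rest

-- ===== PRECONDITION & SPEC =====
-- Pre_ excludes only the empty list, on which the Python A (and B) raise ValueError.
def Pre_pick_primary_time_table_py (candidates : List (String × String)) : Prop := candidates ≠ []
instance (candidates : List (String × String)) : Decidable (Pre_pick_primary_time_table_py candidates) := by unfold Pre_pick_primary_time_table_py; infer_instance
def pvWitness_pick_primary_time_table_py : (List (String × String)) := [("scene", "ts"), ("lidar_pc", "timestamp")]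

def Spec_pick_primary_time_table_py (candidates : List (String × String)) (out : String × String) : Prop := out = pick_primary_time_table_py_alt candidates
instance (candidates : List (String × String)) (out : String × String) : Decidable (Spec_pick_primary_time_table_py candidates out) := by unfold Spec_pick_primary_time_table_py; infer_instance

-- ===== CLAIM (what is proved, stated in full; the proofs are below) =====
def Claim_equal_pick_primary_time_table_py : Prop := ∀ (candidates : List (String × String)), Dom_pick_primary_time_table_py candidates → Pre_pick_primary_time_table_py candidates → Spec_pick_primary_time_table_py candidates (pick_primary_time_table_py candidates)

-- ===== LEMMAS AND PROOFS =====

-- the rank of a table name as a Nat (index in A's preferred list, 4 if absent)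
def rnk (t : String) : Nat :=
  if t = "lidar_pc" then 0 else if t = "ego_pose" then 1 else if t = "scene" then 2
  else if t = "scenario" then 3 else 4

def preferred : List String := ["lidar_pc", "ego_pose", "scene", "scenario"]

lemma rnk_le (t : String) : rnk t ≤ 4 := by
  unfold rnk; split_ifs <;> omega

lemma pvRank_eq (t : String) : pvRank t = (rnk t : Nat) := by
  unfold pvRank rnk
  by_cases h0 : t = "lidar_pc"
  · subst h0; decide
  by_cases h1 : t = "ego_pose"
  · subst h1; decide
  by_cases h2 : t = "scene"
  · subst h2; decide
  by_cases h3 : t = "scenario"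
  · subst h3; decide
  rw [if_neg h0, if_neg h1, if_neg h2, if_neg h3,
    show pvRankDict = PySem.Dict.mk [("lidar_pc", 0), ("ego_pose", 1), ("scene", 2), ("scenario", 3)] from rfl,
    PySem.Dict.getD_eq_get?_getD]
  simp [PySem.Dict.get?, List.find?, beq_eq_false_iff_ne.mpr (Ne.symm h0),
    beq_eq_false_iff_ne.mpr (Ne.symm h1), beq_eq_false_iff_ne.mpr (Ne.symm h2),
    beq_eq_false_iff_ne.mpr (Ne.symm h3)]

lemma outer_nil (ps : List String) : pickA_outer [] ps = none := by
  induction ps with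
  | nil => rfl
  | cons p ps ih => simp [pickA_outer, pickA_inner, ih]

lemma outer_cons (k : Nat) (hk : k ≤ 4) (c : String × String) (rest : List (String × String)) :
    pickA_outer (c :: rest) (preferred.take k) =
      if rnk c.1 < k then
        some (match pickA_outer rest (preferred.take (rnk c.1)) with
              | some d => d
              | none => c)
      else pickA_outer rest (preferred.take k) := by
  by_cases h0 : c.1 = "lidar_pc" <;> by_cases h1 : c.1 = "ego_pose" <;>
    by_cases h2 : c.1 = "scene" <;> by_cases h3 : c.1 = "scenario" <;>
    interval_cases k <;>
    simp_all [preferred, rnk, pickA_outer, pickA_inner] <;>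
    (try cases h : pickA_inner "lidar_pc" rest) <;>
    (try cases h' : pickA_inner "ego_pose" rest) <;>
    (try cases h'' : pickA_inner "scene" rest) <;>
    simp_all

lemma loop_eq (rest : List (String × String)) :
    ∀ best : String × String,
      pickB_loop best (pvRank best.1) rest =
        match pickA_outer rest (preferred.take (rnk best.1)) with
        | some d => d
        | none => best := by
  induction rest with
  | nil => intro best; simp [pickB_loop, outer_nil]
  | cons c rest ih =>
    intro best
    rw [outer_cons (rnk best.1) (rnk_le _) c rest]
    by_cases h : rnk c.1 < rnk best.1
    · have hlt : pvRank c.1 < pvRank best.1 := by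
        rw [pvRank_eq, pvRank_eq]; exact_mod_cast h
      simp only [pickB_loop, if_pos h, if_pos hlt]
      exact ih c
    · have hge : ¬ pvRank c.1 < pvRank best.1 := by
        rw [pvRank_eq, pvRank_eq]; exact_mod_cast h
      simp only [pickB_loop, if_neg h, if_neg hge]
      exact ih best

-- ===== VERDICT (by name: the statement is the Claim_ definition above) =====
theorem pick_primary_time_table_py_spec : Claim_equal_pick_primary_time_table_py := by
  intro candidates _ hpre
  unfold Spec_pick_primary_time_table_py
  cases candidates with
  | nil => exact absurd rfl hpre
  | cons c rest =>
    have h4 : preferred.take 4 = preferred := rfl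
    show (match pickA_outer (c :: rest) ["lidar_pc", "ego_pose", "scene", "scenario"] with
          | some d => d
          | none => c) = pickB_loop c (pvRank c.1) rest
    rw [loop_eq rest c]
    have := outer_cons 4 (le_refl 4) c rest
    rw [h4] at this
    rw [show (["lidar_pc", "ego_pose", "scene", "scenario"] : List String) = preferred from rfl, this]
    by_cases h : rnk c.1 < 4
    · rw [if_pos h]
    · have h4' : rnk c.1 = 4 := by have := rnk_le c.1; omega
      rw [if_neg h, h4', h4]
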